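-- pv_equiv track=rewrite | github.com/updaun/CodingTest | programmers/2023/230729_1.py | solution
-- ===== SOURCE A (Python) =====
-- def solution(arr):
--     answer = 0
--     temp = []
--     while True:
--         temp = []
--         for i in arr:
--             if i >= 50 and i % 2 == 0:
--                 temp.append(i//2)
--             elif i < 50 and i % 2 != 0:
--                 temp.append(i*2+1)
--             else:
--                 temp.append(i)
--         if arr == temp:
--             break
--         answer += 1
--         arr = temp
--     return answer
-- ===== SOURCE B (Python) =====
-- def solution(arr):
--     def steps(x):
--         n = 0
--         # phase 1: halve while the value is a large even number
--         while x >= 50 and x % 2 == 0: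
--             x //= 2
--             n += 1
--         # phase 2: grow a small odd number (x -> 2x+1 stays odd; -1 is its fixed point)
--         while x < 50 and x % 2 != 0 and x != -1:
--             x = 2 * x + 1
--             n += 1
--         return n
--     best = 0
--     for x in arr:
--         best = max(best, steps(x))
--     return best
-- ===== Notes on version B (the rewrite author's own statement) =====
-- stated objective: alternative
-- what changed: Instead of A's round-by-round rebuild of the whole array compared against the previous round, B computes each element's step count to its fixed point independently as two straight-line phases (halve while large-even, then double while small-odd) and returns the maximum count.
import Mathlib
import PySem

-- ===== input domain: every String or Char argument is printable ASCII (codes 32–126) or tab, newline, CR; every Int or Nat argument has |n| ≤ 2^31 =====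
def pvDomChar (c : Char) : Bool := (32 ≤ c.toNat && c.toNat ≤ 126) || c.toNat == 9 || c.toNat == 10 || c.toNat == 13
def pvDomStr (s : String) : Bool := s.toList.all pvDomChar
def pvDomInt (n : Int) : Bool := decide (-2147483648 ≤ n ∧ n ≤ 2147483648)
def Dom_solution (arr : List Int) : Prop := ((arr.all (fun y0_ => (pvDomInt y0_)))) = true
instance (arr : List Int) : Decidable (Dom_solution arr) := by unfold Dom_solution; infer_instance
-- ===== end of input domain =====

-- B replaces A's whole-array round-by-round rebuild-and-compare by an independent
-- per-element step count (a halving phase, then a doubling phase) and a running maximum.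
-- The fuel constants (128, 64) only make the Lean recursions total: on every input
-- admitted by Pre_solution with |x| ≤ 2^31 the loops stop far below them.

-- ===== PORT A =====
-- 'while True: temp = [transform each i]; if arr == temp: break; answer += 1; arr = temp'
def solutionLoop : Nat → List Int → Int → Int
  | 0, _, answer => answer
  | Nat.succ fuel, arr, answer =>
      let temp := arr.map (fun i =>
        if 50 ≤ i ∧ PySem.Int.mod i 2 = 0 then PySem.Int.floordiv i 2
        else if i < 50 ∧ PySem.Int.mod i 2 ≠ 0 then i * 2 + 1
        else i)
      if arr = temp then answer else solutionLoop fuel temp (answer + 1)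

def solution (arr : List Int) : Int := solutionLoop 128 arr 0

-- ===== PORT B =====
-- Source B phase 1: 'while x >= 50 and x % 2 == 0: x //= 2; n += 1' — returns (final x, n)
def halvePhase : Nat → Int → Int × Int
  | 0, x => (x, 0)
  | Nat.succ fuel, x =>
      if 50 ≤ x ∧ PySem.Int.mod x 2 = 0 then
        let r := halvePhase fuel (PySem.Int.floordiv x 2)
        (r.1, r.2 + 1)
      else (x, 0)

-- Source B phase 2: 'while x < 50 and x % 2 != 0 and x != -1: x = 2*x + 1; n += 1'
def doublePhase : Nat → Int → Int
  | 0, _ => 0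
  | Nat.succ fuel, x =>
      if x < 50 ∧ PySem.Int.mod x 2 ≠ 0 ∧ x ≠ -1 then doublePhase fuel (2 * x + 1) + 1
      else 0

def stepsB (x : Int) : Int := (halvePhase 64 x).2 + doublePhase 64 (halvePhase 64 x).1

def solution_alt (arr : List Int) : Int :=
  arr.foldl (fun best x => max best (stepsB x)) 0

-- ===== PRECONDITION & SPEC =====
-- Pre_ excludes arrays with an odd element below -1: there A's while loop never
-- terminates (x -> 2x+1 runs away), so A returns on exactly the inputs admitted here.
def Pre_solution (arr : List Int) : Prop :=
  ∀ x ∈ arr, PySem.Int.mod x 2 ≠ 0 → -1 ≤ x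
instance (arr : List Int) : Decidable (Pre_solution arr) := by unfold Pre_solution; infer_instance

def pvWitness_solution : List Int := [100, 3, 7, -4]

def Spec_solution (arr : List Int) (out : Int) : Prop := out = solution_alt arr
instance (arr : List Int) (out : Int) : Decidable (Spec_solution arr out) := by unfold Spec_solution; infer_instance

-- ===== CLAIM (what is proved, stated in full; the proofs are below) =====
def Claim_equal_solution : Prop := ∀ (arr : List Int), Dom_solution arr → Pre_solution arr → Spec_solution arr (solution arr)

-- ===== LEMMAS AND PROOFS =====

-- the per-element step function of A's round (proof-side name for A's inlined lambda)
def pstep (x : Int) : Int :=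
  if 50 ≤ x ∧ PySem.Int.mod x 2 = 0 then PySem.Int.floordiv x 2
  else if x < 50 ∧ PySem.Int.mod x 2 ≠ 0 then x * 2 + 1
  else x

-- number of steps to fixed point, fuel-bounded (pure counter)
def cnt : Nat → Int → Int
  | 0, _ => 0
  | Nat.succ F, x => if pstep x = x then 0 else 1 + cnt F (pstep x)

theorem cnt_nonneg (F : Nat) (x : Int) : 0 ≤ cnt F x := by
  induction F generalizing x with
  | zero => simp [cnt]
  | succ F ih =>
      simp only [cnt]
      split
      · omega
      · have := ih (pstep x); omega

theorem cnt_fixed (F : Nat) (x : Int) (h : pstep x = x) : cnt F x = 0 := by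
  cases F <;> simp [cnt, h]

def maxL (l : List Int) : Int := l.foldl max 0

theorem foldl_max_acc (l : List Int) (a : Int) (ha : 0 ≤ a) :
    l.foldl max a = max a (maxL l) := by
  induction l generalizing a with
  | nil => simp [maxL]; omega
  | cons x l ih =>
      simp only [maxL, List.foldl_cons]
      rw [ih (max a x) (by omega), ih (max 0 x) (by omega)]
      unfold maxL
      omega

theorem maxL_cons (x : Int) (l : List Int) (hx : 0 ≤ x) :
    maxL (x :: l) = max x (maxL l) := by
  simp only [maxL, List.foldl_cons]
  rw [foldl_max_acc l (max 0 x) (by omega)]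
  unfold maxL
  omega

theorem maxL_nonneg (l : List Int) : 0 ≤ maxL l := by
  induction l with
  | nil => simp [maxL]
  | cons x l ih =>
      simp only [maxL, List.foldl_cons]
      rw [foldl_max_acc l (max 0 x) (by omega)]
      unfold maxL at *
      omega

theorem le_maxL (l : List Int) (x : Int) (hx : x ∈ l) : x ≤ maxL l := by
  induction l with
  | nil => cases hx
  | cons y l ih =>
      simp only [maxL, List.foldl_cons]
      rw [foldl_max_acc l (max 0 y) (by omega)]
      rw [List.mem_cons] at hx
      rcases hx with h | h
      · subst h; unfold maxL; omega
      · have := ih h; unfold maxL at *; omega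

theorem maxL_le (l : List Int) (B : Int) (hB : 0 ≤ B) (h : ∀ x ∈ l, x ≤ B) : maxL l ≤ B := by
  induction l with
  | nil => simp [maxL]; omega
  | cons y l ih =>
      simp only [maxL, List.foldl_cons]
      rw [foldl_max_acc l (max 0 y) (by omega)]
      have hy := h y (by simp)
      have := ih (fun x hx => h x (by simp [hx]))
      unfold maxL at *
      omega

theorem maxL_map_zero (l : List Int) : maxL (l.map (fun _ => (0:Int))) = 0 := by
  induction l with
  | nil => simp [maxL]
  | cons x l ih =>
      simp only [List.map_cons]
      rw [maxL_cons _ _ le_rfl, ih]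
      simp

theorem maxL_one_add (l : List Int) (w : Int → Int) (hne : l ≠ [])
    (hw : ∀ x ∈ l, 0 ≤ w x) :
    maxL (l.map (fun x => 1 + w x)) = 1 + maxL (l.map w) := by
  induction l with
  | nil => cases hne rfl
  | cons x l ih =>
      by_cases h : l = []
      · subst h
        have := hw x (by simp)
        simp [maxL]
        omega
      · have hx := hw x (by simp)
        have hrec := ih h (fun y hy => hw y (by simp [hy]))
        simp only [List.map_cons]
        rw [maxL_cons _ _ (by omega), maxL_cons _ _ (by omega), hrec]
        have h1 : 0 ≤ maxL (l.map w) := maxL_nonneg _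
        omega

theorem map_eq_self_of (l : List Int) (h : l.map pstep = l) : ∀ x ∈ l, pstep x = x := by
  induction l with
  | nil => intro x hx; cases hx
  | cons y l ih =>
      simp only [List.map_cons, List.cons.injEq] at h
      intro x hx
      rw [List.mem_cons] at hx
      rcases hx with h1 | h1
      · subst h1; exact h.1
      · exact ih h.2 x h1

-- the key max equality for one round, given some element is not yet fixed
theorem maxL_round (F : Nat) (l : List Int) (x₀ : Int) (hx₀ : x₀ ∈ l) (hnf : pstep x₀ ≠ x₀) :
    maxL (l.map (cnt (F + 1))) = 1 + maxL (l.map (fun x => cnt F (pstep x))) := by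
  have hv : maxL (l.map (fun x => 1 + cnt F (pstep x))) = 1 + maxL (l.map (fun x => cnt F (pstep x))) :=
    maxL_one_add l _ (by rintro rfl; cases hx₀) (fun x _ => cnt_nonneg F (pstep x))
  rw [← hv]
  apply le_antisymm
  · apply maxL_le _ _ (maxL_nonneg _)
    intro y hy
    simp only [List.mem_map] at hy
    obtain ⟨x, hx, rfl⟩ := hy
    calc cnt (F + 1) x ≤ 1 + cnt F (pstep x) := by
          simp only [cnt]
          split
          · rename_i h; have := cnt_nonneg F (pstep x); omega
          · omega
      _ ≤ maxL (l.map (fun x => 1 + cnt F (pstep x))) :=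
          le_maxL _ _ (List.mem_map.mpr ⟨x, hx, rfl⟩)
  · apply maxL_le _ _ (maxL_nonneg _)
    intro y hy
    simp only [List.mem_map] at hy
    obtain ⟨x, hx, rfl⟩ := hy
    by_cases hfx : pstep x = x
    · have : (1 : Int) + cnt F (pstep x) = 1 := by rw [hfx, cnt_fixed F x hfx]; ring
      rw [this]
      calc (1 : Int) ≤ cnt (F + 1) x₀ := by
            simp only [cnt]
            rw [if_neg hnf]
            have := cnt_nonneg F (pstep x₀)
            omega
        _ ≤ maxL (l.map (cnt (F + 1))) := le_maxL _ _ (List.mem_map.mpr ⟨x₀, hx₀, rfl⟩)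
    · have : (1 : Int) + cnt F (pstep x) = cnt (F + 1) x := by simp [cnt, hfx]
      rw [this]
      exact le_maxL _ _ (List.mem_map.mpr ⟨x, hx, rfl⟩)

theorem solutionLoop_eq (F : Nat) : ∀ (arr : List Int) (ans : Int),
    solutionLoop F arr ans = ans + maxL (arr.map (cnt F)) := by
  induction F with
  | zero =>
      intro arr ans
      simp only [solutionLoop]
      have : arr.map (cnt 0) = arr.map (fun _ => (0:Int)) := by simp [cnt]
      rw [this, maxL_map_zero]
      ring
  | succ F ih =>
      intro arr ans
      show (if arr = arr.map pstep then ans else solutionLoop F (arr.map pstep) (ans + 1)) = _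
      split
      · rename_i h
        have hf := map_eq_self_of arr h.symm
        have : arr.map (cnt (F + 1)) = arr.map (fun _ => (0:Int)) := by
          apply List.map_congr_left
          intro x hx
          simp [cnt, hf x hx]
        rw [this, maxL_map_zero]; ring
      · rename_i h
        rw [ih]
        have h2 : ¬ arr.map pstep = arr := fun hc => h hc.symm
        obtain ⟨x₀, hx₀, hnf⟩ : ∃ x ∈ arr, pstep x ≠ x := by
          by_contra hall
          push Not at hall
          exact h2 (List.map_congr_left (fun x hx => hall x hx) |>.trans (List.map_id arr))
        rw [List.map_map]
        have := maxL_round F arr x₀ hx₀ hnf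
        rw [Function.comp_def, this]
        ring

-- ---- B side: relating the two phases to cnt ----

-- abbreviations for the two loop conditions
abbrev hCond (x : Int) : Prop := 50 ≤ x ∧ PySem.Int.mod x 2 = 0
abbrev dCond (x : Int) : Prop := x < 50 ∧ PySem.Int.mod x 2 ≠ 0 ∧ x ≠ -1

theorem mod_two (x : Int) : PySem.Int.mod x 2 = x % 2 :=
  PySem.Int.mod_eq_emod_of_pos (by norm_num)

theorem fdiv_two (x : Int) : PySem.Int.floordiv x 2 = x / 2 :=
  PySem.Int.floordiv_eq_ediv_of_pos (by norm_num)

theorem pstep_of_hCond (x : Int) (h : hCond x) : pstep x = x / 2 := by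
  unfold pstep; rw [if_pos h, fdiv_two]

theorem pstep_half_ne (x : Int) (h : hCond x) : pstep x ≠ x := by
  rw [pstep_of_hCond x h]
  have h2 := h.1
  omega

-- the doubling loop runs in lockstep with cnt once the halve condition is dead
theorem cnt_eq_doublePhase (F : Nat) : ∀ (x : Int), ¬ hCond x → cnt F x = doublePhase F x := by
  induction F with
  | zero => intro x _; rfl
  | succ F ih =>
      intro x hh
      by_cases hd : dCond x
      · have hps : pstep x = x * 2 + 1 := by
          unfold pstep
          rw [if_neg hh, if_pos ⟨hd.1, hd.2.1⟩]
        have hne : pstep x ≠ x := by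
          rw [hps]; have := hd.2.2; omega
        have hh' : ¬ hCond (x * 2 + 1) := by
          unfold hCond
          rw [mod_two]
          omega
        simp only [cnt, doublePhase]
        rw [if_neg hne, if_pos hd, hps, ih _ hh']
        have : x * 2 + 1 = 2 * x + 1 := by ring
        rw [this]
        omega
      · have hps : pstep x = x := by
          unfold pstep
          rw [if_neg hh]
          by_cases hsmall : x < 50 ∧ PySem.Int.mod x 2 ≠ 0
          · rw [if_pos hsmall]
            have hx1 : x = -1 := by
              by_contra hne
              exact hd ⟨hsmall.1, hsmall.2, hne⟩
            omega
          · rw [if_neg hsmall]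
        simp only [cnt, doublePhase]
        rw [if_pos hps, if_neg hd]

-- the doubling loop stabilizes once its fuel is sufficient
theorem doublePhase_stable (F : Nat) : ∀ (G : Nat) (x : Int),
    (dCond x → 1 ≤ x ∧ 51 ≤ (x + 1) * 2 ^ F) → F ≤ G → doublePhase G x = doublePhase F x := by
  induction F with
  | zero =>
      intro G x hs _
      have hnd : ¬ dCond x := by
        intro hd
        have := hs hd
        have := hd.1
        simp at this
        omega
      cases G with
      | zero => rfl
      | succ G => simp only [doublePhase, if_neg hnd]
  | succ F ih =>
      intro G x hs hFG
      cases G with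
      | zero => omega
      | succ G =>
          by_cases hd : dCond x
          · obtain ⟨hx1, hx2⟩ := hs hd
            simp only [doublePhase, if_pos hd]
            have hrec := ih G (2 * x + 1) (fun _ => ⟨by omega, by
              have : (2 * x + 1 + 1) * 2 ^ F = (x + 1) * 2 ^ (F + 1) := by ring
              omega⟩) (by omega)
            rw [hrec]
          · simp only [doublePhase, if_neg hd]

-- the halving loop runs in lockstep with cnt's first phase
theorem cnt_eq_phases (F : Nat) : ∀ (G : Nat) (x : Int), ¬ hCond (halvePhase F x).1 →
    (dCond (halvePhase F x).1 → 1 ≤ (halvePhase F x).1 ∧ 51 ≤ ((halvePhase F x).1 + 1) * 2 ^ G) →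
    cnt (F + G) x = (halvePhase F x).2 + doublePhase G (halvePhase F x).1 := by
  induction F with
  | zero =>
      intro G x hcl _
      simp only [halvePhase] at *
      simpa using (cnt_eq_doublePhase G x hcl)
  | succ F ih =>
      intro G x hcl hs
      by_cases hh : hCond x
      · have hrep : halvePhase (F + 1) x =
            ((halvePhase F (PySem.Int.floordiv x 2)).1, (halvePhase F (PySem.Int.floordiv x 2)).2 + 1) := by
          simp only [halvePhase, if_pos hh]
        rw [hrep] at hcl hs ⊢
        have hps : pstep x = x / 2 := pstep_of_hCond x hh
        have hstep : cnt (F + 1 + G) x = 1 + cnt (F + G) (x / 2) := by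
          have : F + 1 + G = (F + G) + 1 := by omega
          rw [this]
          simp only [cnt]
          rw [if_neg (pstep_half_ne x hh), hps]
        rw [hstep, ← fdiv_two, ih G _ hcl hs]
        simp only
        omega
      · have hrep : halvePhase (F + 1) x = (x, 0) := by
          simp only [halvePhase, if_neg hh]
        rw [hrep] at hcl hs ⊢
        simp only at hcl hs ⊢
        rw [cnt_eq_doublePhase (F + 1 + G) x hcl,
            doublePhase_stable G (F + 1 + G) x hs (by omega)]
        omega

-- the halve phase never exhausts fuel F once x < 2^F
theorem halve_clean (F : Nat) : ∀ (x : Int), x < 2 ^ F → ¬ hCond (halvePhase F x).1 := by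
  induction F with
  | zero =>
      intro x hx
      simp only [halvePhase]
      intro h
      have := h.1
      simp at hx
      omega
  | succ F ih =>
      intro x hx
      by_cases hh : hCond x
      · have hrep : halvePhase (F + 1) x =
            ((halvePhase F (PySem.Int.floordiv x 2)).1, (halvePhase F (PySem.Int.floordiv x 2)).2 + 1) := by
          simp only [halvePhase, if_pos hh]
        rw [hrep]
        apply ih
        rw [fdiv_two]
        have h1 := hh.1
        have h2 : (2:Int) ^ (F + 1) = 2 * 2 ^ F := by ring
        rw [h2] at hx
        omega
      · simp only [halvePhase, if_neg hh]
        exact hh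

-- the halve phase either leaves x untouched or lands at a value ≥ 25
theorem halve_out (F : Nat) : ∀ (x : Int), (halvePhase F x).1 = x ∨ 25 ≤ (halvePhase F x).1 := by
  induction F with
  | zero => intro x; left; rfl
  | succ F ih =>
      intro x
      by_cases hh : hCond x
      · have hrep : halvePhase (F + 1) x =
            ((halvePhase F (PySem.Int.floordiv x 2)).1, (halvePhase F (PySem.Int.floordiv x 2)).2 + 1) := by
          simp only [halvePhase, if_pos hh]
        rw [hrep]
        simp only
        rcases ih (PySem.Int.floordiv x 2) with h | h
        · right
          rw [h, fdiv_two]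
          have := hh.1
          omega
        · right; exact h
      · left; simp only [halvePhase, if_neg hh]

-- per-element agreement on Dom ∩ Pre
theorem stepsB_eq_cnt (x : Int) (hub : x ≤ 2147483648) (hodd : PySem.Int.mod x 2 ≠ 0 → -1 ≤ x) :
    stepsB x = cnt 128 x := by
  have hcl : ¬ hCond (halvePhase 64 x).1 := halve_clean 64 x (by norm_num; omega)
  have hs : dCond (halvePhase 64 x).1 →
      1 ≤ (halvePhase 64 x).1 ∧ 51 ≤ ((halvePhase 64 x).1 + 1) * 2 ^ 64 := by
    intro hd
    have h1 : 1 ≤ (halvePhase 64 x).1 := by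
      rcases halve_out 64 x with h | h
      · rw [h] at hd ⊢
        have h2 := hodd hd.2.1
        have h3 := hd.2.2
        have h4 : x % 2 ≠ 0 := by rw [← mod_two]; exact hd.2.1
        omega
      · omega
    refine ⟨h1, ?_⟩
    have : (2:Int) * 2 ^ 64 ≤ ((halvePhase 64 x).1 + 1) * 2 ^ 64 := by
      apply mul_le_mul_of_nonneg_right (by omega) (by positivity)
    norm_num at this ⊢
    omega
  have := cnt_eq_phases 64 64 x hcl hs
  rw [stepsB, ← this]

theorem solution_alt_eq (arr : List Int) :
    solution_alt arr = maxL (arr.map stepsB) := by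
  unfold solution_alt maxL
  rw [List.foldl_map]

-- ===== VERDICT (by name: the statement is the Claim_ definition above) =====
theorem solution_spec : Claim_equal_solution := by
  intro arr hdom hpre
  unfold Spec_solution solution
  rw [solution_alt_eq, solutionLoop_eq]
  have hmap : arr.map stepsB = arr.map (cnt 128) := by
    apply List.map_congr_left
    intro x hx
    have hd : pvDomInt x = true := by
      rw [Dom_solution, List.all_eq_true] at hdom
      exact hdom x hx
    rw [pvDomInt, decide_eq_true_eq] at hd
    exact stepsB_eq_cnt x hd.2 (hpre x hx)
  rw [hmap]
  ring
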